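-- pv_equiv track=rewrite | github.com/Kbalazs3/The-Keymaker-Python | keymaker.py | zig_zag_concatenate
-- ===== SOURCE A (Python) =====
-- def zig_zag_concatenate(matrix):
--     new_word = ""
--     length = len(matrix[0])
--     index = 0
--     while True:
--         if index < length:
--             for elements in matrix:
--                 new_word += elements[index]
--             index += 1
--         elif index == length:
--             break
--         if index < length:
--             for elements in matrix[::-1]:
--                 new_word += elements[index]
--             index += 1
--         elif index == length:
--             break
--     return new_word
-- ===== SOURCE B (Python) =====
-- def zig_zag_concatenate(matrix):
--     length = len(matrix[0])
--     n = len(matrix)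
--     chars = []
--     for t in range(length * n):
--         j, k = divmod(t, n)
--         r = k if j % 2 == 0 else n - 1 - k
--         chars.append(matrix[r][j])
--     return ''.join(chars)
-- ===== Notes on version B (the rewrite author's own statement) =====
-- stated objective: alternative
-- what changed: Replaces A's while-True loop with two alternating row traversals (forward then over matrix[::-1]) by closed-form position arithmetic: one flat loop over range(length*n) where divmod(t,n) gives the column and the offset and the row index is computed directly (k or n-1-k by column parity), so there is no inner pass and no reversed copy of the matrix.
import Mathlib
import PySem

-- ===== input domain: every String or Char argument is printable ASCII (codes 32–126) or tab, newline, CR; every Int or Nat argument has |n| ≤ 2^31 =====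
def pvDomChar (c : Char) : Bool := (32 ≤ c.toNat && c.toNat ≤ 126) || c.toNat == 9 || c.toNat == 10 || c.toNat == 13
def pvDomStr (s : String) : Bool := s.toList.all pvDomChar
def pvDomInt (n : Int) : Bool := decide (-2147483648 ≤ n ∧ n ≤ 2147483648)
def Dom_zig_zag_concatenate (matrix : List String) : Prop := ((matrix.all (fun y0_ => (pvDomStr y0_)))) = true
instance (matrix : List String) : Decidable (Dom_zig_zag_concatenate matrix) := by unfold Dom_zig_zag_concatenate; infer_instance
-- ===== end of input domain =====

-- B replaces A's alternating row traversals by closed-form position arithmetic over one flat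
-- index range (divmod picks the column and the row) — objective: alternative.

-- ===== PORT A =====
-- A's while-True loop: at each round, a forward pass over the rows at `index`, then (if still
-- in range) a pass over matrix[::-1] at `index+1`.  `elements[index]` is ported with
-- PySem.List.pyGet? on the row's characters (none = IndexError, excluded by Pre_); the string
-- accumulator `new_word` is carried as a List Char and packed with String.ofList at the end.
def zzALoop (rows : List (List Char)) (length : Nat) (index : Nat) (acc : List Char) : List Char :=
  if index < length then
    let acc := rows.foldl (fun a r => a ++ (PySem.List.pyGet? r (index : Int)).toList) acc
    let index := index + 1
    if index < length then
      let acc := rows.reverse.foldl (fun a r => a ++ (PySem.List.pyGet? r (index : Int)).toList) acc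
      zzALoop rows length (index + 1) acc
    else acc
  else acc
termination_by length - index

def zig_zag_concatenate (matrix : List String) : String :=
  let rows := matrix.map String.toList
  let length := (rows.headD []).length   -- len(matrix[0]); matrix ≠ [] is in Pre_
  String.ofList (zzALoop rows length 0 [])

-- ===== PORT B =====
-- the body of B's single loop: chars.append(matrix[r][j]) with j, k = divmod(t, n) and
-- r = k if j % 2 == 0 else n - 1 - k; both indexings ported with pyGet? (none = IndexError,
-- excluded by Pre_)
def zzBStep (matrix : List String) (t : Int) : List Char :=
  let n : Int := matrix.length
  let j := PySem.Int.floordiv t n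
  let k := PySem.Int.mod t n
  let r := if PySem.Int.mod j 2 == 0 then k else n - 1 - k
  match PySem.List.pyGet? matrix r with
  | some s => (PySem.List.pyGet? s.toList j).toList
  | none => []

def zig_zag_concatenate_alt (matrix : List String) : String :=
  let length : Int := ((matrix.headD "").toList).length   -- len(matrix[0])
  let n : Int := matrix.length
  let chars := (PySem.List.pyRange 0 (length * n) 1).foldl (fun a t => a ++ zzBStep matrix t) []
  String.ofList chars

-- ===== PRECONDITION & SPEC =====
-- Exactly the inputs on which A returns: a nonempty matrix whose every row is at least as long
-- as the first row (otherwise A's `matrix[0]` or `elements[index]` raises IndexError; B raises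
-- IndexError on those same inputs).
def Pre_zig_zag_concatenate (matrix : List String) : Prop :=
  matrix ≠ [] ∧ ∀ s ∈ matrix, (matrix.headD "").toList.length ≤ s.toList.length
instance (matrix : List String) : Decidable (Pre_zig_zag_concatenate matrix) := by
  unfold Pre_zig_zag_concatenate; infer_instance
def pvWitness_zig_zag_concatenate : List String := ["abc", "xyz"]

def Spec_zig_zag_concatenate (matrix : List String) (out : String) : Prop :=
  out = zig_zag_concatenate_alt matrix
instance (matrix : List String) (out : String) : Decidable (Spec_zig_zag_concatenate matrix out) := by
  unfold Spec_zig_zag_concatenate; infer_instance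

-- ===== CLAIM (what is proved, stated in full; the proofs are below) =====
def Claim_equal_zig_zag_concatenate : Prop := ∀ (matrix : List String),
  Dom_zig_zag_concatenate matrix → Pre_zig_zag_concatenate matrix →
  Spec_zig_zag_concatenate matrix (zig_zag_concatenate matrix)

-- ===== LEMMAS AND PROOFS =====

-- the j-th column of the matrix (rows all long enough)
def colF (rows : List (List Char)) (j : Nat) : List Char := rows.map (fun r => r.getD j ' ')

theorem fwd_pass (rows : List (List Char)) (j : Nat) (acc : List Char)
    (h : ∀ r ∈ rows, j < r.length) :
    rows.foldl (fun a r => a ++ (PySem.List.pyGet? r (j : Int)).toList) acc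
      = acc ++ colF rows j := by
  rw [PySem.List.foldl_append_eq_flatMap]
  congr 1
  induction rows with
  | nil => rfl
  | cons r t ih =>
    have hj := h r (List.mem_cons_self)
    rw [List.flatMap_cons, colF, List.map_cons,
      ih (fun r' hr' => h r' (List.mem_cons_of_mem _ hr'))]
    rw [PySem.List.pyGet?_natCast, List.getElem?_eq_getElem hj]
    simp [colF, List.getD, List.getElem?_eq_getElem hj]

theorem bwd_pass (rows : List (List Char)) (j : Nat) (acc : List Char)
    (h : ∀ r ∈ rows, j < r.length) :
    rows.reverse.foldl (fun a r => a ++ (PySem.List.pyGet? r (j : Int)).toList) acc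
      = acc ++ (colF rows j).reverse := by
  rw [fwd_pass rows.reverse j acc (by intro r hr; exact h r (List.mem_reverse.mp hr))]
  simp [colF]

theorem zzALoop_eq (rows : List (List Char)) (L : Nat) (hall : ∀ r ∈ rows, L ≤ r.length) :
    ∀ (n i : Nat) (acc : List Char), L - i = n → i % 2 = 0 →
    zzALoop rows L i acc
      = acc ++ ((List.range' i n).map
          (fun j => if j % 2 = 0 then colF rows j else (colF rows j).reverse)).flatten := by
  intro n
  induction n using Nat.strong_induction_on with
  | _ n ih =>
    intro i acc hn hpar
    by_cases h1 : i < L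
    · rw [zzALoop, if_pos h1]
      have hin : ∀ r ∈ rows, i < r.length := fun r hr => lt_of_lt_of_le h1 (hall r hr)
      rw [fwd_pass rows i acc hin]
      by_cases h2 : i + 1 < L
      · have hin2 : ∀ r ∈ rows, i + 1 < r.length := fun r hr => lt_of_lt_of_le h2 (hall r hr)
        rw [if_pos h2, bwd_pass rows (i + 1) _ hin2]
        obtain ⟨m, rfl⟩ : ∃ m, n = m + 2 := ⟨n - 2, by omega⟩
        rw [ih m (by omega) (i + 2) _ (by omega) (by omega)]
        have : List.range' i (m + 2) = i :: (i + 1) :: List.range' (i + 2) m := by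
          rw [show m + 2 = (m + 1) + 1 from rfl, List.range'_succ, List.range'_succ]
        rw [this]
        have hp1 : ¬ (i + 1) % 2 = 0 := by omega
        simp [hpar, hp1, List.append_assoc]
      · rw [if_neg h2]
        have : n = 1 := by omega
        subst this
        simp [hpar]
    · rw [zzALoop, if_neg h1]
      have : n = 0 := by omega
      subst this
      simp

theorem flatMap_singleton_of {α : Type} (l : List α) (e : α → List Char) (c : α → Char)
    (h : ∀ x ∈ l, e x = [c x]) : l.flatMap e = l.map c := by
  induction l with
  | nil => rfl
  | cons x t ih =>
    rw [List.flatMap_cons, h x (List.mem_cons_self), List.map_cons,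
      ih (fun y hy => h y (List.mem_cons_of_mem _ hy))]
    rfl

theorem map_range_getD {α β : Type} (xs : List α) (d : α) (h : α → β) :
    (List.range xs.length).map (fun k => h (xs.getD k d)) = xs.map h := by
  apply List.ext_getElem (by simp)
  intro i h1 h2
  simp only [List.getElem_map, List.getElem_range]
  rw [List.getD_eq_getElem xs d (by simpa using h2)]

-- one block of B's flat loop = one column (forward when j is even, reversed when odd)
theorem zzB_block (matrix : List String) (j : Nat)
    (hrows : ∀ s ∈ matrix, j < s.toList.length) :
    (PySem.List.pyRange ((j : Int) * matrix.length) (((j : Int) + 1) * matrix.length) 1).flatMap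
        (zzBStep matrix)
      = if j % 2 = 0 then colF (matrix.map String.toList) j
        else (colF (matrix.map String.toList) j).reverse := by
  rw [PySem.List.pyRange_one]
  have hd : ((((j : Int) + 1) * matrix.length - (j : Int) * matrix.length)).toNat
      = matrix.length := by
    have : (((j : Int) + 1) * matrix.length - (j : Int) * matrix.length)
        = (matrix.length : Int) := by ring
    rw [this]; exact Int.toNat_natCast _
  rw [hd, List.flatMap_map]
  set n := matrix.length with hn
  have hstep : ∀ k, k < n →
      zzBStep matrix ((j : Int) * n + k)
        = [((matrix.getD (if j % 2 = 0 then k else n - 1 - k) "").toList).getD j ' '] := by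
    intro k hk
    have hnpos : 0 < n := by omega
    have hcast : (j : Int) * n + k = ((j * n + k : Nat) : Int) := by push_cast; ring
    unfold zzBStep
    rw [hcast]
    have hfd : PySem.Int.floordiv ((j * n + k : Nat) : Int) ((n : Nat) : Int)
        = (((j * n + k) / n : Nat) : Int) := PySem.Int.floordiv_natCast _ _
    have hmd : PySem.Int.mod ((j * n + k : Nat) : Int) ((n : Nat) : Int)
        = (((j * n + k) % n : Nat) : Int) := PySem.Int.mod_natCast _ _
    have hdiv : (j * n + k) / n = j := by
      rw [Nat.mul_comm j n, Nat.mul_add_div hnpos, Nat.div_eq_of_lt hk]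
      omega
    have hmod : (j * n + k) % n = k := by
      rw [Nat.mul_comm j n, Nat.mul_add_mod]; exact Nat.mod_eq_of_lt hk
    simp only [← hn, hfd, hmd, hdiv, hmod]
    have hjm : PySem.Int.mod ((j : Nat) : Int) (2 : Int) = ((j % 2 : Nat) : Int) := by
      exact_mod_cast PySem.Int.mod_natCast j 2
    by_cases hp : j % 2 = 0
    · have hcond : (PySem.Int.mod ((j : Nat) : Int) 2 == 0) = true := by
        rw [hjm, hp]; rfl
      rw [if_pos (by simpa using hcond)]
      have hget : PySem.List.pyGet? matrix ((k : Nat) : Int) = matrix[k]? :=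
        PySem.List.pyGet?_natCast _ _
      rw [hget, List.getElem?_eq_getElem (by omega)]
      have hjlen : j < (matrix[k]).toList.length :=
        hrows _ (List.getElem_mem (by omega))
      show (PySem.List.pyGet? (matrix[k]).toList ((j : Nat) : Int)).toList = _
      rw [PySem.List.pyGet?_natCast, List.getElem?_eq_getElem hjlen, if_pos hp]
      rw [List.getD_eq_getElem matrix "" (by omega)]
      rw [List.getD_eq_getElem _ ' ' hjlen]
      rfl
    · have hcond : (PySem.Int.mod ((j : Nat) : Int) 2 == 0) = false := by
        have h1 : j % 2 = 1 := by omega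
        rw [hjm, h1]; rfl
      rw [hcond]
      simp only [Bool.false_eq_true, if_false]
      have hr : (n : Int) - 1 - (k : Nat) = ((n - 1 - k : Nat) : Int) := by omega
      rw [hr]
      have hlt : n - 1 - k < n := by omega
      have hget : PySem.List.pyGet? matrix ((n - 1 - k : Nat) : Int) = matrix[n - 1 - k]? :=
        PySem.List.pyGet?_natCast _ _
      rw [hget, List.getElem?_eq_getElem (by omega)]
      have hjlen : j < (matrix[n - 1 - k]).toList.length :=
        hrows _ (List.getElem_mem (by omega))
      show (PySem.List.pyGet? (matrix[n - 1 - k]).toList ((j : Nat) : Int)).toList = _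
      rw [PySem.List.pyGet?_natCast, List.getElem?_eq_getElem hjlen, if_neg hp]
      rw [List.getD_eq_getElem matrix "" (by omega)]
      rw [List.getD_eq_getElem _ ' ' hjlen]
      rfl
  rw [flatMap_singleton_of _ _ _ (fun x hx => hstep x (List.mem_range.mp hx))]
  have hcol : colF (matrix.map String.toList) j
      = matrix.map (fun s => s.toList.getD j ' ') := by
    simp [colF, List.map_map]
  by_cases hp : j % 2 = 0
  · rw [if_pos hp, hcol, ← map_range_getD matrix "" (fun s => s.toList.getD j ' ')]
    simp only [hp, if_true]
    rfl
  · rw [if_neg hp, hcol, ← List.map_reverse,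
      ← map_range_getD matrix.reverse "" (fun s => s.toList.getD j ' '),
      List.length_reverse]
    apply List.map_congr_left
    intro k hk
    have hk' : k < n := List.mem_range.mp hk
    simp only [hp, if_false]
    rw [List.getD_eq_getElem matrix.reverse "" (by simpa using hk'),
      List.getD_eq_getElem matrix "" (by omega), List.getElem_reverse]

-- B's flat range 0..L*n splits into L blocks of n
theorem range_mul_flatMap (g : Int → List Char) (n : Nat) : ∀ L : Nat,
    (PySem.List.pyRange 0 ((L : Int) * n) 1).flatMap g
      = ((List.range L).map
          (fun (j : Nat) => (PySem.List.pyRange ((j : Int) * n) (((j : Int) + 1) * n) 1).flatMap g)).flatten := by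
  intro L
  induction L with
  | zero => simp [PySem.List.pyRange_one_eq_nil]
  | succ L ih =>
    have hsplit : PySem.List.pyRange 0 (((L + 1 : Nat) : Int) * n) 1
        = PySem.List.pyRange 0 ((L : Int) * n) 1
          ++ PySem.List.pyRange ((L : Int) * n) (((L : Int) + 1) * n) 1 := by
      have h1 : (0 : Int) ≤ (L : Int) * n := by positivity
      have h2 : (L : Int) * n ≤ ((L : Int) + 1) * n := by nlinarith [Int.natCast_nonneg n]
      have hc : ((L + 1 : Nat) : Int) * n = ((L : Int) + 1) * n := by push_cast; ring
      rw [hc]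
      exact PySem.List.pyRange_one_append 0 ((L : Int) * n) (((L : Int) + 1) * n) h1 h2
    rw [hsplit, List.flatMap_append, ih, List.range_succ, List.map_append]
    simp

-- ===== VERDICT (by name: the statement is the Claim_ definition above) =====
theorem zig_zag_concatenate_spec : Claim_equal_zig_zag_concatenate := by
  intro matrix _ hpre
  obtain ⟨hne, hall⟩ := hpre
  unfold Spec_zig_zag_concatenate zig_zag_concatenate zig_zag_concatenate_alt
  show String.ofList (zzALoop (matrix.map String.toList)
        (((matrix.map String.toList).headD []).length) 0 [])
      = String.ofList ((PySem.List.pyRange 0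
          (((matrix.headD "").toList.length : Int) * (matrix.length : Int)) 1).foldl
            (fun a t => a ++ zzBStep matrix t) [])
  set rows := matrix.map String.toList with hrows
  set L := ((matrix.headD "").toList).length with hL
  have hLrows : (rows.headD []).length = L := by
    cases matrix with
    | nil => exact absurd rfl hne
    | cons m ms => simp [hrows, hL]
  have hall' : ∀ r ∈ rows, L ≤ r.length := by
    intro r hr
    obtain ⟨s, hs, rfl⟩ := List.mem_map.mp hr
    exact hall s hs
  rw [hLrows]
  rw [zzALoop_eq rows L hall' L 0 [] (by omega) (by omega)]
  rw [PySem.List.foldl_append_eq_flatMap]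
  rw [range_mul_flatMap (zzBStep matrix) matrix.length L]
  rw [List.range_eq_range']
  congr 1
  simp only [List.nil_append]
  congr 1
  apply List.map_congr_left
  intro j hj
  have hjL : j < L := by
    rw [← List.range_eq_range'] at hj
    exact List.mem_range.mp hj
  rw [zzB_block matrix j (fun s hs => lt_of_lt_of_le hjL (hall s hs))]
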